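-- pv_equiv track=rewrite | github.com/SachaDIMARTINO/python-skeleton | q5.py | question05
-- ===== SOURCE A (Python) =====
-- def question05(allowedAllocations, totalValue):
--   # modify and then return the variable below
--   answer = -1
--   X = sorted(allowedAllocations, reverse = True)
--   for i in range(len(X)):
--     res = [X[i]]
--     while sum(res) < totalValue and i < len(X):
--       if X[i] > 0:
--         if totalValue % X[i] == 0:
--           if sum(res) + X[i] <= totalValue:
--             res.append(X[i])
--           else:
--             i += 1
--         elif sum(res) + X[i] <= totalValue:
--           res.append(X[i])
--         else:
--           i += 1
--       else:
--         i += 1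
--     if sum(res) == totalValue and (len(res) < answer or answer < 0):
--       answer = len(res)
--   return answer
-- ===== SOURCE B (Python) =====
-- def question05(allowedAllocations, totalValue):
--     X = sorted(allowedAllocations, reverse=True)
--     best = -1
--     for i in range(len(X)):
--         rem = totalValue - X[i]
--         count = 1
--         for j in range(i, len(X)):
--             if rem <= 0:
--                 break
--             v = X[j]
--             if v > 0:
--                 take = rem // v
--                 count += take
--                 rem -= take * v
--         if rem == 0 and (best < 0 or count < best):
--             best = count
--     return best
-- ===== Notes on version B (the rewrite author's own statement) =====
-- stated objective: faster
-- what changed: Per start index, B replaces A's append-one-coin-at-a-time while loop (which recomputes sum(res) on every pass) by a single scan over the remaining coins taking rem // coin of each at once.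
import Mathlib
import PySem

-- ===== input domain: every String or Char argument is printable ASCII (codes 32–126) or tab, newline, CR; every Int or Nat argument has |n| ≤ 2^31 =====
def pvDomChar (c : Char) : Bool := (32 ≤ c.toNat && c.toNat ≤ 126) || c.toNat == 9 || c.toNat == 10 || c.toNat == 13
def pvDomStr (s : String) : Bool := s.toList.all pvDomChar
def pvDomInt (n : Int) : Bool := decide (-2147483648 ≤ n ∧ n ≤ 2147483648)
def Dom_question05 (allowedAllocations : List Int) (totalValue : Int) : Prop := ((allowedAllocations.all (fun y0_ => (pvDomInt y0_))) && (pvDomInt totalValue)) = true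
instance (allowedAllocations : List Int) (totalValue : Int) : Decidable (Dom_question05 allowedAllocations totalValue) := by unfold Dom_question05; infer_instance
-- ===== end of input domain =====

-- B replaces A's one-element-at-a-time appends (with sum(res) recomputed each pass) by a
-- single floor-division count per coin; objective: faster (per-start cost drops from
-- O(count^2) additions to one pass over the coins).

-- ===== PORT A =====
-- A's inner while loop: state is the list res and the index i (both mutated in place).
-- The fuel argument is only a structural totality guard; the caller passes enough fuel
-- ((T - sum).toNat + len + 1 strictly dominates the loop's decreasing measure), so the
-- fuel-out branch is never reached.
def q05LoopA (X : List Int) (T : Int) : Nat → List Int → Nat → List Int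
  | 0, res, _ => res
  | Nat.succ fuel, res, i =>
    if h : res.sum < T ∧ i < X.length then
      let v := X[i]'h.2
      if v > 0 then
        if T % v = 0 then
          if res.sum + v ≤ T then q05LoopA X T fuel (res ++ [v]) i
          else q05LoopA X T fuel res (i + 1)
        else if res.sum + v ≤ T then q05LoopA X T fuel (res ++ [v]) i
        else q05LoopA X T fuel res (i + 1)
      else q05LoopA X T fuel res (i + 1)
    else res

def question05 (allowedAllocations : List Int) (totalValue : Int) : Int :=
  let X := PySem.List.sorted allowedAllocations (fun x => x) true
  (List.range X.length).foldl
    (fun answer i =>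
      let res := q05LoopA X totalValue ((totalValue - X.getD i 0).toNat + X.length + 1) [X.getD i 0] i
      if res.sum = totalValue ∧ ((res.length : Int) < answer ∨ answer < 0)
      then (res.length : Int) else answer)
    (-1)

-- ===== PORT B =====
-- B's inner for-loop over j in range(i, len(X)), ported as recursion over the suffix X[i:].
def q05LoopB (coins : List Int) (rem : Int) (count : Int) : Int × Int :=
  match coins with
  | [] => (rem, count)
  | v :: rest =>
    if rem ≤ 0 then (rem, count)
    else if v > 0 then
      let take := PySem.Int.floordiv rem v
      q05LoopB rest (rem - take * v) (count + take)
    else q05LoopB rest rem count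

def question05_alt (allowedAllocations : List Int) (totalValue : Int) : Int :=
  let X := PySem.List.sorted allowedAllocations (fun x => x) true
  (List.range X.length).foldl
    (fun best i =>
      let p := q05LoopB (X.drop i) (totalValue - X.getD i 0) 1
      if p.1 = 0 ∧ (best < 0 ∨ p.2 < best) then p.2 else best)
    (-1)

-- ===== PRECONDITION & SPEC =====
def Spec_question05 (allowedAllocations : List Int) (totalValue : Int) (out : Int) : Prop := out = question05_alt allowedAllocations totalValue
instance (allowedAllocations : List Int) (totalValue : Int) (out : Int) : Decidable (Spec_question05 allowedAllocations totalValue out) := by unfold Spec_question05; infer_instance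

-- ===== CLAIM (what is proved, stated in full; the proofs are below) =====
def Claim_equal_question05 : Prop := ∀ (allowedAllocations : List Int) (totalValue : Int), Dom_question05 allowedAllocations totalValue → Spec_question05 allowedAllocations totalValue (question05 allowedAllocations totalValue)

-- ===== LEMMAS AND PROOFS =====

theorem q05LoopB_nonpos (coins : List Int) (rem count : Int) (h : rem ≤ 0) :
    q05LoopB coins rem count = (rem, count) := by
  cases coins with
  | nil => simp [q05LoopB]
  | cons v rest => simp [q05LoopB, h]

theorem q05LoopB_cons_pos (v : Int) (rest : List Int) (rem c : Int)
    (hr : 0 < rem) (hv : 0 < v) :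
    q05LoopB (v :: rest) rem c = q05LoopB rest (rem - rem / v * v) (c + rem / v) := by
  simp [q05LoopB, not_le.mpr hr, hv, PySem.Int.floordiv, Int.fdiv_eq_ediv_of_nonneg _ hv.le]

-- Taking one coin v out of rem by hand agrees with B's batched floor-division count.
theorem q05LoopB_peel (v : Int) (rest : List Int) (rem c : Int)
    (hv : 0 < v) (hle : v ≤ rem) :
    q05LoopB (v :: rest) rem c = q05LoopB (v :: rest) (rem - v) (c + 1) := by
  have hr : 0 < rem := lt_of_lt_of_le hv hle
  by_cases hz : rem - v ≤ 0
  · have hveq : rem = v := le_antisymm (by omega) hle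
    have hd : rem / v = 1 := by rw [hveq]; exact Int.ediv_self (by omega)
    rw [q05LoopB_cons_pos v rest rem c hr hv, hd, one_mul,
      q05LoopB_nonpos rest (rem - v) (c + 1) hz,
      q05LoopB_nonpos (v :: rest) (rem - v) (c + 1) hz]
  · have hz' : 0 < rem - v := by omega
    rw [q05LoopB_cons_pos v rest rem c hr hv,
      q05LoopB_cons_pos v rest (rem - v) (c + 1) hz' hv]
    have hd : rem / v = (rem - v) / v + 1 := by
      have h1 : rem = (rem - v) + 1 * v := by ring
      conv_lhs => rw [h1]
      rw [Int.add_mul_ediv_right _ _ (by omega : v ≠ 0)]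
    rw [hd]
    congr 1 <;> ring

-- The key correspondence: A's append-one-at-a-time loop from state (res, i) computes the
-- same running total and element count as B's floor-division loop over the suffix X[i:],
-- for any fuel exceeding the loop's decreasing measure.
theorem q05Loop_corr (X : List Int) (T : Int) : ∀ (fuel : Nat) (res : List Int) (i : Nat),
    (T - res.sum).toNat + (X.length - i) < fuel →
    q05LoopB (X.drop i) (T - res.sum) (res.length) =
      (T - (q05LoopA X T fuel res i).sum, ((q05LoopA X T fuel res i).length : Int)) := by
  intro fuel
  induction fuel with
  | zero => intro res i h; omega
  | succ n IH =>
    intro res i hfuel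
    by_cases hlt : res.sum < T
    · by_cases hi : i < X.length
      · rw [List.drop_eq_getElem_cons hi]
        set v := X[i] with hv
        have hr : 0 < T - res.sum := by omega
        by_cases hvpos : v > 0
        · by_cases hfit : res.sum + v ≤ T
          · -- A appends v; B's batch count at this coin absorbs it
            have hA : q05LoopA X T (n + 1) res i = q05LoopA X T n (res ++ [v]) i := by
              rw [q05LoopA]; simp only [hlt, hi, and_self, dif_pos]
              by_cases hm : T % v = 0 <;> simp [hm, hvpos, hfit, ← hv]
            rw [hA]
            have hm' : (T - (res ++ [v]).sum).toNat + (X.length - i) < n := by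
              simp only [List.sum_append, List.sum_cons, List.sum_nil, add_zero]
              omega
            have ih := IH (res ++ [v]) i hm'
            rw [List.drop_eq_getElem_cons hi, ← hv] at ih
            rw [q05LoopB_peel v _ _ _ hvpos (by omega)]
            have e1 : T - res.sum - v = T - (res ++ [v]).sum := by simp; ring
            have e2 : (res.length : Int) + 1 = ((res ++ [v]).length : Int) := by
              simp
            rw [e1, e2]; exact ih
          · -- coin too large: A advances i, B takes 0 of it
            have hA : q05LoopA X T (n + 1) res i = q05LoopA X T n res (i + 1) := by
              rw [q05LoopA]; simp only [hlt, hi, and_self, dif_pos]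
              by_cases hm : T % v = 0 <;> simp [hm, hvpos, hfit, ← hv]
            rw [hA]
            have hd : (T - res.sum) / v = 0 :=
              Int.ediv_eq_zero_of_lt (by omega) (by omega)
            rw [q05LoopB_cons_pos v _ _ _ hr hvpos, hd, zero_mul, sub_zero, add_zero]
            exact IH res (i + 1) (by omega)
        · -- nonpositive coin: both skip it
          have hA : q05LoopA X T (n + 1) res i = q05LoopA X T n res (i + 1) := by
            rw [q05LoopA]; simp only [hlt, hi, and_self, dif_pos]
            simp [hvpos, ← hv]
          rw [hA]
          have : q05LoopB (v :: X.drop (i + 1)) (T - res.sum) (res.length : Int)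
              = q05LoopB (X.drop (i + 1)) (T - res.sum) (res.length : Int) := by
            simp [q05LoopB, not_le.mpr hr, hvpos]
          rw [this]
          exact IH res (i + 1) (by omega)
      · have hA : q05LoopA X T (n + 1) res i = res := by rw [q05LoopA]; simp [hi]
        rw [hA, List.drop_eq_nil_of_le (by omega)]
        simp [q05LoopB]
    · have hA : q05LoopA X T (n + 1) res i = res := by rw [q05LoopA]; simp [hlt]
      rw [hA, q05LoopB_nonpos _ _ _ (by omega)]

-- ===== VERDICT (by name: the statement is the Claim_ definition above) =====
theorem question05_spec : Claim_equal_question05 := by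
  intro a T _
  unfold Spec_question05 question05 question05_alt
  apply PySem.List.foldl_congr_mem
  intro acc i _
  set X := PySem.List.sorted a (fun x => x) true with hX
  set F := (T - X.getD i 0).toNat + X.length + 1 with hF
  have h := q05Loop_corr X T F [X.getD i 0] i (by
    simp only [List.sum_cons, List.sum_nil, add_zero, hF]; omega)
  simp only [List.sum_cons, List.sum_nil, add_zero, List.length_cons,
    List.length_nil, Nat.cast_one, Nat.zero_add] at h
  rw [h]
  have hsum : (q05LoopA X T F [X.getD i 0] i).sum = T ↔
      T - (q05LoopA X T F [X.getD i 0] i).sum = 0 := by omega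
  by_cases hcond : (q05LoopA X T F [X.getD i 0] i).sum = T ∧
      (((q05LoopA X T F [X.getD i 0] i).length : Int) < acc ∨ acc < 0)
  · rw [if_pos hcond, if_pos ⟨by omega, Or.symm hcond.2⟩]
  · rw [if_neg hcond, if_neg (by rw [hsum, or_comm] at hcond; exact hcond)]
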